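-- pv_equiv track=rewrite | github.com/ticvac/vkostky | environment.py | check_if_can_keep
-- ===== SOURCE A (Python) =====
-- def check_if_can_keep(dices, keep):
--     if len(keep) > 6 or keep == []:
--         return False
--     # postupka
--     if sorted(keep) == [1, 2, 3, 4, 5, 6] and sorted(dices) == [1, 2, 3, 4, 5, 6]:
--         return True
--     # trojice a zbytek...
--     for i in [2, 3, 4, 6]:
--         # chce si nechat malo
--         if 0 < keep.count(i) < 3:
--             return False
--         # chce si nechat vic nez ma
--         if keep.count(i) > dices.count(i):
--             return False
--         # odstranime...
--         keep = [x for x in keep if x != i]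
--     if keep.count(1) > dices.count(1):
--         return False
--     if keep.count(5) > dices.count(5):
--         return False
--     # odstranime jednicky...
--     keep = [x for x in keep if x != 1 and x != 5]
--     return len(keep) == 0
-- ===== SOURCE B (Python) =====
-- def check_if_can_keep(dices, keep):
--     if len(keep) > 6 or keep == []:
--         return False
--     ks = sorted(keep)
--     ds = sorted(dices)
--     # postupka
--     if ks == [1, 2, 3, 4, 5, 6] and ds == [1, 2, 3, 4, 5, 6]:
--         return True
--     # merge scan: sorted keep must be a sub-multiset of sorted dices
--     j = 0
--     for x in ks:
--         while j < len(ds) and ds[j] < x: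
--             j += 1
--         if j == len(ds) or ds[j] != x:
--             return False
--         j += 1
--     # run scan over sorted keep: every face in 1..6, triples for 2,3,4,6
--     i = 0
--     while i < len(ks):
--         x = ks[i]
--         r = i
--         while r < len(ks) and ks[r] == x:
--             r += 1
--         if x < 1 or x > 6 or (x in (2, 3, 4, 6) and r - i < 3):
--             return False
--         i = r
--     return True
-- ===== Notes on version B (the rewrite author's own statement) =====
-- stated objective: alternative
-- what changed: Replaces A's per-face counting loop with destructive list rebuilding by a sort-based algorithm: sort keep and dices once, verify keep is a sub-multiset of dices with a two-pointer merge scan, and verify the face rules (values in 1..6, runs of 2/3/4/6 at least 3 long) with a run-length scan over the sorted keep; no counts are ever taken.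
import Mathlib
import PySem

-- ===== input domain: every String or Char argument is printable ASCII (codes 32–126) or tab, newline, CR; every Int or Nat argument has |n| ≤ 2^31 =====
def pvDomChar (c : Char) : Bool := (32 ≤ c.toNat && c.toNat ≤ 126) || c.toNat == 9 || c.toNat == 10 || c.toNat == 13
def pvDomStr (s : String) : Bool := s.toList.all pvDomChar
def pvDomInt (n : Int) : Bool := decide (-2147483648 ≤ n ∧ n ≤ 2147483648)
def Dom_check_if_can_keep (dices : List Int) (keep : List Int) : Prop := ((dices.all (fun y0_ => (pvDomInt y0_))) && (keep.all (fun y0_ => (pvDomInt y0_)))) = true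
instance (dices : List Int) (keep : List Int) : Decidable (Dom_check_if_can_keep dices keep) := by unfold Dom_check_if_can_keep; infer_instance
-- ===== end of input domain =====

-- B sorts both lists once and decides legality by a two-pointer merge scan (sub-multiset
-- test) plus a run-length scan over the sorted keep, instead of A's per-face counting
-- loop with destructive list rebuilding (objective: alternative algorithm, same result).


-- ===== PORT A =====
-- A's `for i in [2,3,4,6]` loop with early `return False` and the rebinding
-- `keep = [x for x in keep if x != i]`: `none` = early False return.
def aFaceLoop (dices : List Int) : List Int → List Int → Option (List Int)
  | [], keep => some keep
  | i :: rest, keep =>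
    if 0 < PySem.List.count keep i ∧ PySem.List.count keep i < 3 then none
    else if PySem.List.count keep i > PySem.List.count dices i then none
    else aFaceLoop dices rest (keep.filter (fun x => x != i))

def check_if_can_keep (dices : List Int) (keep : List Int) : Bool :=
  if keep.length > 6 ∨ keep = [] then false
  else if PySem.List.sorted keep (fun x => x) = [1, 2, 3, 4, 5, 6] ∧
          PySem.List.sorted dices (fun x => x) = [1, 2, 3, 4, 5, 6] then true
  else
    match aFaceLoop dices [2, 3, 4, 6] keep with
    | none => false
    | some keep1 =>
      if PySem.List.count keep1 1 > PySem.List.count dices 1 then false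
      else if PySem.List.count keep1 5 > PySem.List.count dices 5 then false
      else (keep1.filter (fun x => x != 1 && x != 5)).length == 0

-- ===== PORT B =====
-- Source B's merge scan: for each x of sorted keep, advance j over sorted dices while
-- ds[j] < x (= dropWhile), then demand a matching element; `false` = early return.
def bMsub : List Int → List Int → Bool
  | [], _ => true
  | x :: ks, ds =>
    match ds.dropWhile (fun d => d < x) with
    | [] => false
    | d :: ds' => if d == x then bMsub ks ds' else false

-- Source B's run-length scan: take the run of the current value (r advances while equal),
-- reject out-of-range values and short runs of 2/3/4/6, continue after the run.
def bRunScan (ks : List Int) : Bool :=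
  match ks with
  | [] => true
  | x :: rest =>
    if x < 1 ∨ x > 6 ∨
        ((x = 2 ∨ x = 3 ∨ x = 4 ∨ x = 6) ∧ (rest.takeWhile (fun y => y == x)).length + 1 < 3)
      then false
    else bRunScan (rest.dropWhile (fun y => y == x))
termination_by ks.length
decreasing_by
  have := List.length_dropWhile_le (fun y => y == x) rest
  simp; omega

def check_if_can_keep_alt (dices : List Int) (keep : List Int) : Bool :=
  if keep.length > 6 ∨ keep = [] then false
  else
    let ks := PySem.List.sorted keep (fun x => x)
    let ds := PySem.List.sorted dices (fun x => x)
    if ks = [1, 2, 3, 4, 5, 6] ∧ ds = [1, 2, 3, 4, 5, 6] then true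
    else if ¬ bMsub ks ds then false
    else bRunScan ks

-- ===== PRECONDITION & SPEC =====
def Spec_check_if_can_keep (dices : List Int) (keep : List Int) (out : Bool) : Prop := out = check_if_can_keep_alt dices keep
instance (dices : List Int) (keep : List Int) (out : Bool) : Decidable (Spec_check_if_can_keep dices keep out) := by unfold Spec_check_if_can_keep; infer_instance

-- ===== CLAIM (what is proved, stated in full; the proofs are below) =====
def Claim_equal_check_if_can_keep : Prop := ∀ (dices : List Int) (keep : List Int), Dom_check_if_can_keep dices keep → Spec_check_if_can_keep dices keep (check_if_can_keep dices keep)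

-- ===== LEMMAS AND PROOFS =====

-- common characterization both ports are reduced to
def Cnd (dices : List Int) (keep : List Int) : Prop :=
  (∀ f ∈ ([2, 3, 4, 6] : List Int),
      keep.count f = 0 ∨ (3 ≤ keep.count f ∧ keep.count f ≤ dices.count f)) ∧
  keep.count 1 ≤ dices.count 1 ∧ keep.count 5 ≤ dices.count 5 ∧
  ∀ x ∈ keep, 1 ≤ x ∧ x ≤ 6

theorem count_filter_ne (l : List Int) (i j : Int) :
    (l.filter (fun x => x != i)).count j = if j = i then 0 else l.count j := by
  induction l with
  | nil => simp
  | cons a t ih =>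
    by_cases hai : a = i <;> by_cases haj : a = j <;>
      simp [List.filter_cons, List.count_cons, hai, haj, ih] <;> split <;> simp_all

theorem count_merged (l : List Int) (j : Int) (h2 : j ≠ 2) (h3 : j ≠ 3) (h4 : j ≠ 4) (h6 : j ≠ 6) :
    (l.filter (fun a => a != 6 && (a != 4 && (a != 3 && a != 2)))).count j = l.count j := by
  induction l with
  | nil => rfl
  | cons a t ih =>
    by_cases haj : a = j
    · subst haj
      simp [h2, h3, h4, h6, ih]
    · by_cases f : (a != 6 && (a != 4 && (a != 3 && a != 2))) = true <;>
        simp [f, haj, ih]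

theorem dropWhile_head_false {p : Int → Bool} {l : List Int} {d : Int} {t : List Int}
    (h : l.dropWhile p = d :: t) : p d = false := by
  induction l with
  | nil => simp at h
  | cons a l ih =>
    by_cases hp : p a = true
    · rw [List.dropWhile_cons_of_pos hp] at h; exact ih h
    · rw [List.dropWhile_cons_of_neg hp] at h
      cases h; simpa using hp

theorem msub_iff (ks ds : List Int) (hk : ks.Pairwise (· ≤ ·)) (hd : ds.Pairwise (· ≤ ·)) :
    bMsub ks ds = true ↔ ∀ y : Int, ks.count y ≤ ds.count y := by
  induction ks generalizing ds with
  | nil => simp [bMsub]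
  | cons x ks ih =>
    have hsplit : ds.takeWhile (fun d => decide (d < x)) ++ ds.dropWhile (fun d => decide (d < x)) = ds :=
      List.takeWhile_append_dropWhile
    have hT : ∀ t ∈ ds.takeWhile (fun d => decide (d < x)), t < x := by
      intro t ht; simpa using List.mem_takeWhile_imp ht
    have hks : ∀ y ∈ ks, x ≤ y := (List.pairwise_cons.mp hk).1
    have hk' : ks.Pairwise (· ≤ ·) := (List.pairwise_cons.mp hk).2
    cases hD : ds.dropWhile (fun d => decide (d < x)) with
    | nil =>
      have hxds : ds.count x = 0 := by
        rw [← hsplit, hD, List.append_nil, List.count_eq_zero]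
        intro hm; exact absurd (hT x hm) (lt_irrefl x)
      simp only [bMsub, hD]
      constructor
      · intro h; simp at h
      · intro h; exfalso
        have := h x
        simp [List.count_cons_self, hxds] at this
    | cons d ds' =>
      have hdge : x ≤ d := by
        have := dropWhile_head_false hD; simp at this; omega
      have hsub : (d :: ds').Sublist ds := hD ▸ List.dropWhile_sublist _
      have hds' : ∀ y ∈ ds', d ≤ y := (List.pairwise_cons.mp (hd.sublist hsub)).1
      have hd' : ds'.Pairwise (· ≤ ·) := (List.pairwise_cons.mp (hd.sublist hsub)).2
      have hcount : ∀ y : Int, x ≤ y → ds.count y = (d :: ds').count y := by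
        intro y hy
        rw [← hsplit, hD, List.count_append, List.count_eq_zero.mpr, Nat.zero_add]
        intro hm; exact absurd (hT y hm) (by omega)
      by_cases hdx : d = x
      · subst hdx
        simp only [bMsub, hD, beq_self_eq_true, if_true]
        rw [ih ds' hk' hd']
        constructor
        · intro h y
          by_cases hxy : d ≤ y
          · rw [hcount y hxy]
            by_cases hyx : y = d
            · subst hyx
              rw [List.count_cons_self, List.count_cons_self]
              exact Nat.succ_le_succ (h y)
            · rw [List.count_cons_of_ne (by omega), List.count_cons_of_ne (by omega)]
              exact h y
          · have hnk : y ∉ ks := fun hm => hxy (hks y hm)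
            rw [List.count_cons_of_ne (by omega), List.count_eq_zero.mpr hnk]
            exact Nat.zero_le _
        · intro h y
          by_cases hxy : d ≤ y
          · have h1 := h y
            rw [hcount y hxy] at h1
            by_cases hyx : y = d
            · subst hyx
              rw [List.count_cons_self, List.count_cons_self] at h1
              omega
            · rw [List.count_cons_of_ne (by omega), List.count_cons_of_ne (by omega)] at h1
              exact h1
          · have : y ∉ ks := fun hm => hxy (hks y hm)
            simp [List.count_eq_zero.mpr this]
      · have hdgt : x < d := by omega
        simp only [bMsub, hD, beq_iff_eq]
        rw [if_neg hdx]
        constructor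
        · intro h; simp at h
        · intro h; exfalso
          have h1 := h x
          rw [hcount x (le_refl x)] at h1
          have hnm : x ∉ d :: ds' := by
            intro hm
            rcases List.mem_cons.mp hm with rfl | hm
            · omega
            · exact absurd (hds' x hm) (by omega)
          rw [List.count_eq_zero.mpr hnm] at h1
          simp [List.count_cons_self] at h1

theorem runScan_iff (ks : List Int) (hk : ks.Pairwise (· ≤ ·)) :
    bRunScan ks = true ↔
      ∀ x ∈ ks, (1 ≤ x ∧ x ≤ 6) ∧ ((x = 2 ∨ x = 3 ∨ x = 4 ∨ x = 6) → 3 ≤ (ks.count x : Nat)) := by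
  induction hn : ks.length using Nat.strong_induction_on generalizing ks with
  | _ n IH =>
  cases ks with
  | nil => simp [bRunScan]
  | cons x rest =>
    have hrest : ∀ y ∈ rest, x ≤ y := (List.pairwise_cons.mp hk).1
    have hkr : rest.Pairwise (· ≤ ·) := (List.pairwise_cons.mp hk).2
    have hTsplit : rest.takeWhile (fun y => y == x) ++ rest.dropWhile (fun y => y == x) = rest :=
      List.takeWhile_append_dropWhile
    set T := rest.takeWhile (fun y => y == x) with hTdef
    set D := rest.dropWhile (fun y => y == x) with hDdef
    have hT : ∀ t ∈ T, t = x := by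
      intro t ht; simpa using List.mem_takeWhile_imp ht
    have hDsub : D.Sublist rest := List.dropWhile_sublist _
    have hDp : D.Pairwise (· ≤ ·) := hkr.sublist hDsub
    have hDgt : ∀ y ∈ D, x < y := by
      cases hD : D with
      | nil => simp
      | cons d t =>
        have hdx : d ≠ x := by have := dropWhile_head_false (hDdef ▸ hD); simpa using this
        have hdge : x ≤ d := hrest d (hDsub.mem (hD ▸ List.mem_cons_self))
        have ht : ∀ y ∈ t, d ≤ y := (List.pairwise_cons.mp (hD ▸ hDp)).1
        intro y hy
        rcases List.mem_cons.mp hy with rfl | hy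
        · omega
        · have := ht y hy; omega
    have hcx : (x :: rest).count x = T.length + 1 := by
      rw [← hTsplit, List.count_cons_self, List.count_append,
        List.count_eq_length.mpr (fun b hb => (hT b hb).symm),
        List.count_eq_zero.mpr (fun hm => absurd (hDgt x hm) (lt_irrefl x))]
    have hcD : ∀ y ∈ D, (x :: rest).count y = D.count y := by
      intro y hy
      have hyx : x < y := hDgt y hy
      rw [← hTsplit, List.count_cons_of_ne (by omega), List.count_append,
        List.count_eq_zero.mpr (fun hm => by have := hT y hm; omega), Nat.zero_add]
    have hmem : ∀ y, y ∈ x :: rest ↔ y = x ∨ y ∈ D := by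
      intro y
      rw [List.mem_cons, ← hTsplit, List.mem_append]
      constructor
      · rintro (rfl | hy | hy)
        · exact Or.inl rfl
        · exact Or.inl (hT y hy)
        · exact Or.inr hy
      · rintro (rfl | hy)
        · exact Or.inl rfl
        · exact Or.inr (Or.inr hy)
    have hlen : D.length < n := by
      have h1 : D.length ≤ rest.length := hDsub.length_le
      simp at hn; omega
    have hIH := IH D.length hlen D hDp rfl
    rw [show bRunScan (x :: rest) =
        (if x < 1 ∨ x > 6 ∨
            ((x = 2 ∨ x = 3 ∨ x = 4 ∨ x = 6) ∧ (rest.takeWhile (fun y => y == x)).length + 1 < 3)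
          then false else bRunScan (rest.dropWhile (fun y => y == x))) from by rw [bRunScan]]
    rw [← hTdef, ← hDdef]
    by_cases hC : x < 1 ∨ x > 6 ∨ ((x = 2 ∨ x = 3 ∨ x = 4 ∨ x = 6) ∧ T.length + 1 < 3)
    · rw [if_pos hC]
      simp only [Bool.false_eq_true, false_iff]
      intro h
      have hx := h x List.mem_cons_self
      rw [hcx] at hx
      rcases hC with h1 | h1 | ⟨h1, h2⟩
      · omega
      · omega
      · have := hx.2 h1; omega
    · rw [if_neg hC]
      push Not at hC
      obtain ⟨hx1, hx2, hface⟩ := hC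
      rw [hIH]
      constructor
      · intro h y hy
        rcases (hmem y).mp hy with rfl | hy
        · refine ⟨⟨by omega, by omega⟩, fun hf => ?_⟩
          rw [hcx]; have := hface hf; omega
        · have := h y hy
          rw [hcD y hy]
          exact this
      · intro h y hy
        have := h y ((hmem y).mpr (Or.inr hy))
        rw [hcD y hy] at this
        exact this

theorem A_rest_iff (dices keep : List Int) :
    (match aFaceLoop dices [2, 3, 4, 6] keep with
     | none => false
     | some keep1 =>
       if PySem.List.count keep1 1 > PySem.List.count dices 1 then false
       else if PySem.List.count keep1 5 > PySem.List.count dices 5 then false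
       else (keep1.filter (fun x => x != 1 && x != 5)).length == 0) = true ↔ Cnd dices keep := by
  cases hres : aFaceLoop dices [2, 3, 4, 6] keep with
  | none =>
    simp only [aFaceLoop, PySem.List.count_eq, count_filter_ne] at hres
    norm_num at hres
    simp only [Bool.false_eq_true, false_iff]
    intro hC
    obtain ⟨hF, h1, h5, hR⟩ := hC
    have c2 := hF 2 (by simp)
    have c3 := hF 3 (by simp)
    have c4 := hF 4 (by simp)
    have c6 := hF 6 (by simp)
    exact Option.some_ne_none _ (hres
      (fun hm => by have := List.count_pos_iff.mpr hm; rcases c2 with h | h <;> omega)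
      (by rcases c2 with h | h <;> omega)
      (fun hm => by have := List.count_pos_iff.mpr hm; rcases c3 with h | h <;> omega)
      (by rcases c3 with h | h <;> omega)
      (fun hm => by have := List.count_pos_iff.mpr hm; rcases c4 with h | h <;> omega)
      (by rcases c4 with h | h <;> omega)
      (fun hm => by have := List.count_pos_iff.mpr hm; rcases c6 with h | h <;> omega)
      (by rcases c6 with h | h <;> omega))
  | some keep1 =>
    simp only [aFaceLoop, PySem.List.count_eq, count_filter_ne] at hres
    norm_num at hres
    obtain ⟨g2m, g2, g3m, g3, g4m, g4, g6m, g6, hk1⟩ := hres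
    subst hk1
    have hc1 := count_merged keep 1 (by decide) (by decide) (by decide) (by decide)
    have hc5 := count_merged keep 5 (by decide) (by decide) (by decide) (by decide)
    simp only [PySem.List.count_eq, hc1, hc5]
    norm_num
    constructor
    · rintro ⟨h1, h5, hmem⟩
      refine ⟨?_, h1, h5, ?_⟩
      · intro f hf
        have hstep : ∀ g : Int, (g ∈ keep → 3 ≤ List.count g keep) →
            List.count g keep ≤ List.count g dices →
            List.count g keep = 0 ∨ 3 ≤ List.count g keep ∧ List.count g keep ≤ List.count g dices := by
          intro g hgm hgd
          by_cases hz : List.count g keep = 0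
          · exact Or.inl hz
          · exact Or.inr ⟨hgm (List.count_pos_iff.mp (by omega)), hgd⟩
        rcases (by simpa using hf : f = 2 ∨ f = 3 ∨ f = 4 ∨ f = 6) with rfl | rfl | rfl | rfl
        · exact hstep 2 g2m g2
        · exact hstep 3 g3m g3
        · exact hstep 4 g4m g4
        · exact hstep 6 g6m g6
      · intro x hx
        have := hmem x hx
        omega
    · rintro ⟨hF, h1, h5, hR⟩
      refine ⟨h1, h5, ?_⟩
      intro a ha ha1 ha5 ha6 ha4 ha3
      have := hR a ha
      omega

theorem B_rest_iff (dices keep : List Int) :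
    (if ¬ bMsub (PySem.List.sorted keep (fun x => x)) (PySem.List.sorted dices (fun x => x))
      then false
      else bRunScan (PySem.List.sorted keep (fun x => x))) = true ↔ Cnd dices keep := by
  have hkperm : (PySem.List.sorted keep (fun x => x)).Perm keep := PySem.List.sorted_perm keep _ false
  have hdperm : (PySem.List.sorted dices (fun x => x)).Perm dices := PySem.List.sorted_perm dices _ false
  have hkp : (PySem.List.sorted keep (fun x => x)).Pairwise (· ≤ ·) := PySem.List.sorted_pairwise keep _
  have hdp : (PySem.List.sorted dices (fun x => x)).Pairwise (· ≤ ·) := PySem.List.sorted_pairwise dices _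
  have hkc : ∀ y : Int, (PySem.List.sorted keep (fun x => x)).count y = keep.count y :=
    fun y => hkperm.count_eq y
  have hdc : ∀ y : Int, (PySem.List.sorted dices (fun x => x)).count y = dices.count y :=
    fun y => hdperm.count_eq y
  have hkm : ∀ y : Int, y ∈ PySem.List.sorted keep (fun x => x) ↔ y ∈ keep :=
    fun y => hkperm.mem_iff
  by_cases hm : bMsub (PySem.List.sorted keep (fun x => x)) (PySem.List.sorted dices (fun x => x)) = true
  · rw [if_neg (by simp [hm]), runScan_iff _ hkp]
    have hcnt := (msub_iff _ _ hkp hdp).mp hm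
    constructor
    · intro h
      refine ⟨?_, ?_, ?_, ?_⟩
      · intro f hf
        by_cases hz : keep.count f = 0
        · exact Or.inl hz
        · have hfk : f ∈ keep := List.count_pos_iff.mp (by omega)
          have hface : f = 2 ∨ f = 3 ∨ f = 4 ∨ f = 6 := by simpa using hf
          have h3 := (h f ((hkm f).mpr hfk)).2 hface
          rw [hkc] at h3
          have hle := hcnt f
          rw [hkc, hdc] at hle
          exact Or.inr ⟨h3, hle⟩
      · have := hcnt 1; rw [hkc, hdc] at this; exact this
      · have := hcnt 5; rw [hkc, hdc] at this; exact this
      · intro x hx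
        exact (h x ((hkm x).mpr hx)).1
    · rintro ⟨hF, h1, h5, hR⟩ x hx
      have hxk : x ∈ keep := (hkm x).mp hx
      refine ⟨hR x hxk, fun hf => ?_⟩
      rw [hkc]
      have hpos : 0 < keep.count x := List.count_pos_iff.mpr hxk
      rcases hF x (by simpa using hf) with hz | ⟨h3, _⟩
      · omega
      · exact h3
  · rw [if_pos (by simp [hm])]
    simp only [Bool.false_eq_true, false_iff]
    intro hC
    apply hm
    rw [msub_iff _ _ hkp hdp]
    intro y
    rw [hkc, hdc]
    by_cases hy : y ∈ keep
    · obtain ⟨hF, h1, h5, hR⟩ := hC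
      have hr := hR y hy
      have c2 := hF 2 (by simp)
      have c3 := hF 3 (by simp)
      have c4 := hF 4 (by simp)
      have c6 := hF 6 (by simp)
      have hpos : 0 < keep.count y := List.count_pos_iff.mpr hy
      rcases (by omega : y = 1 ∨ y = 2 ∨ y = 3 ∨ y = 4 ∨ y = 5 ∨ y = 6) with
        rfl | rfl | rfl | rfl | rfl | rfl <;> omega
    · simp [List.count_eq_zero.mpr hy]

theorem check_if_can_keep_spec : Claim_equal_check_if_can_keep := by
  intro dices keep _
  unfold Spec_check_if_can_keep check_if_can_keep check_if_can_keep_alt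
  by_cases hg : keep.length > 6 ∨ keep = []
  · simp [hg]
  · simp only [hg, if_false]
    by_cases hp : PySem.List.sorted keep (fun x => x) = [1, 2, 3, 4, 5, 6] ∧
        PySem.List.sorted dices (fun x => x) = [1, 2, 3, 4, 5, 6]
    · simp [hp]
    · simp only [hp, if_false]
      rw [Bool.eq_iff_iff, A_rest_iff]
      exact (B_rest_iff dices keep).symm
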